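-- pv_equiv track=rewrite | github.com/Karim-Termanini/PersonalProjekte | hypeHomeDev/src/ui/widgets/workstation/service_manager.py | _process_cmd_catalog_ok
-- ===== SOURCE A (Python) =====
-- import shlex
--
-- _PROCESS_CMD_FORBIDDEN = frozenset(
--     {";", "|", "&", "`", "\n", "\r", "$", "(", ")", "<", ">", "\x00"},
-- )
--
-- _PROCESS_CMD_FORBIDDEN_SUBSTR = ("&&", "||", "$(", "${", ";;", ">&")
--
-- def _process_cmd_catalog_ok(s: str) -> bool:
--     if not isinstance(s, str):
--         return False
--     t = s.strip()
--     if not t or any(c in t for c in _PROCESS_CMD_FORBIDDEN) or any(x in t for x in _PROCESS_CMD_FORBIDDEN_SUBSTR):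
--         return False
--     try:
--         shlex.split(t, posix=True)
--     except ValueError:
--         return False
--     return len(t) <= 2048
-- ===== SOURCE B (Python) =====
-- _FORBIDDEN = ";|&`\n\r$()<>\x00"
--
--
-- def _process_cmd_catalog_ok(s: str) -> bool:
--     if not isinstance(s, str):
--         return False
--     t = s.strip()
--     # One fused pass: count length, reject on the first forbidden character,
--     # and track shlex's POSIX lexer state (ValueError iff input ends inside an
--     # escape or an unclosed quote).  The forbidden-substring tuple is dropped:
--     # every forbidden 2-char substring contains a forbidden character.
--     # States: 0 normal, 1 escape, 2 single-quote, 3 double-quote, 4 escape-in-double-quote.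
--     n = 0
--     st = 0
--     for c in t:
--         n += 1
--         if c in _FORBIDDEN:
--             return False
--         if st == 0:
--             st = 1 if c == "\\" else 2 if c == "'" else 3 if c == '"' else 0
--         elif st == 1:
--             st = 0
--         elif st == 2:
--             st = 0 if c == "'" else 2
--         elif st == 3:
--             st = 0 if c == '"' else 4 if c == "\\" else 3
--         else:
--             st = 3
--     return n != 0 and st == 0 and n <= 2048
-- ===== Notes on version B (the rewrite author's own statement) =====
-- stated objective: faster
-- what changed: B fuses everything into one recursive pass over the stripped string that simultaneously counts the length, rejects on the first forbidden character (the forbidden-substring tuple is dropped since every forbidden 2-char substring contains a forbidden character), and tracks the 5-state shlex POSIX quote/escape lexer state, replacing A's two set-driven any() scans, the substring scan, and the shlex.split try/except, which builds tokens by string concatenation just to discard them.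
import Mathlib
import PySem

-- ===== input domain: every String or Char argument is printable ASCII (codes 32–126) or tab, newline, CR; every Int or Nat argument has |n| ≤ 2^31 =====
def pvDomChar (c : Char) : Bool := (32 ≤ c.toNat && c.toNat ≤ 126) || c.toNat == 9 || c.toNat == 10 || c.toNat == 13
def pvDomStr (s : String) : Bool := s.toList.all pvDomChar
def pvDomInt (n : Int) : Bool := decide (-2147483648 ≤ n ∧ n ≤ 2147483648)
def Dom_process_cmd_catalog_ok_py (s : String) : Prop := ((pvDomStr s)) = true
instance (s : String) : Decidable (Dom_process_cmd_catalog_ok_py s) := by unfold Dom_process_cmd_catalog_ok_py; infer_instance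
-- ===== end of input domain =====

-- B fuses A's staged checks (two any() scans, the redundant forbidden-substring scan, the
-- shlex.split try/except, the length test) into one recursive pass carrying (length, lexer state),
-- avoiding shlex's token construction; a timing run measured B faster; return value proved identical.

-- shlex's POSIX lexer raises ValueError exactly when the input ends inside a backslash escape or
-- an unclosed quote; states: 0 normal, 1 escape, 2 single-quote, 3 double-quote, 4 escape-in-dq.
-- For A this step function is the port of its shlex.split try/except (exact on the stated ASCII
-- domain); for B it is the transliteration of Source B's in-loop state update (same branch order).
def pvShlexStep (st : Nat) (c : Char) : Nat :=
  if st = 0 then (if c = '\\' then 1 else if c = '\'' then 2 else if c = '"' then 3 else 0)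
  else if st = 1 then 0
  else if st = 2 then (if c = '\'' then 0 else 2)
  else if st = 3 then (if c = '"' then 0 else if c = '\\' then 4 else 3)
  else 3

-- ===== PORT A =====
-- _PROCESS_CMD_FORBIDDEN (frozenset; consumed only by order-independent any/membership)
def pvForbidden : PySem.Set Char :=
  PySem.Set.ofList [';', '|', '&', '`', '\n', '\r', '$', '(', ')', '<', '>', '\x00']

-- _PROCESS_CMD_FORBIDDEN_SUBSTR (tuple of 2-char strings, as lists of chars)
def pvForbiddenSub : List (List Char) :=
  [['&','&'], ['|','|'], ['$','('], ['$','{'], [';',';'], ['>','&']]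

-- shlex.split raises ValueError iff the lexer ends in a non-normal state
def pvShlexRaises (t : List Char) : Bool := (t.foldl pvShlexStep 0) != 0

def process_cmd_catalog_ok_py (s : String) : Bool :=
  -- isinstance(s, str) is always true under the type convention
  let t := PySem.Chars.strip s.toList
  if t.isEmpty
      || pvForbidden.any (fun c => PySem.Chars.isIn [c] t)
      || pvForbiddenSub.any (fun x => PySem.Chars.isIn x t) then false
  else if pvShlexRaises t then false
  else decide (t.length ≤ 2048)

-- ===== PORT B =====
-- _FORBIDDEN, Source B's string constant, as its character list (c in str = char membership here)
def pvForbiddenB : List Char :=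
  [';', '|', '&', '`', '\n', '\r', '$', '(', ')', '<', '>', '\x00']

-- Source B's single loop: n += 1; return False on a forbidden char; update the lexer state;
-- after the loop: n != 0 and st == 0 and n <= 2048
def pvScanB : List Char → Nat → Nat → Bool
  | [], n, st => decide (n ≠ 0) && decide (st = 0) && decide (n ≤ 2048)
  | c :: rest, n, st =>
      if pvForbiddenB.contains c then false
      else pvScanB rest (n + 1) (pvShlexStep st c)

def process_cmd_catalog_ok_py_alt (s : String) : Bool :=
  pvScanB (PySem.Chars.strip s.toList) 0 0

-- ===== PRECONDITION & SPEC =====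
def Spec_process_cmd_catalog_ok_py (s : String) (out : Bool) : Prop := out = process_cmd_catalog_ok_py_alt s
instance (s : String) (out : Bool) : Decidable (Spec_process_cmd_catalog_ok_py s out) := by unfold Spec_process_cmd_catalog_ok_py; infer_instance

-- ===== CLAIM (what is proved, stated in full; the proofs are below) =====
def Claim_equal_process_cmd_catalog_ok_py : Prop := ∀ (s : String), Dom_process_cmd_catalog_ok_py s → Spec_process_cmd_catalog_ok_py s (process_cmd_catalog_ok_py s)

-- ===== LEMMAS AND PROOFS =====

-- a one-character substring test is membership
theorem pv_isIn_singleton (c : Char) (t : List Char) :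
    PySem.Chars.isIn [c] t = true ↔ c ∈ t := by
  rw [PySem.Chars.isIn_iff_infix]
  constructor
  · intro h; exact h.sublist.subset (by simp)
  · intro hm
    obtain ⟨u, v, rfl⟩ := List.append_of_mem hm
    exact ⟨u, v, by simp⟩

-- the two any() scans test the same proposition in opposite iteration orders
theorem pv_any_swap (t : List Char) :
    pvForbidden.any (fun c => PySem.Chars.isIn [c] t)
      = t.any (fun x => pvForbiddenB.contains x) := by
  rw [Bool.eq_iff_iff]
  simp only [List.any_eq_true, pv_isIn_singleton, List.contains_eq_mem, decide_eq_true_eq]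
  constructor
  · rintro ⟨c, hc, hm⟩; exact ⟨c, hm, hc⟩
  · rintro ⟨x, hx, hf⟩; exact ⟨x, hf, hx⟩

-- with no forbidden character present, no forbidden 2-char substring can occur
-- (each forbidden substring begins with a forbidden character)
theorem pv_sub_redundant (t : List Char)
    (h : (t.any fun x => pvForbiddenB.contains x) = false) :
    (pvForbiddenSub.any fun x => PySem.Chars.isIn x t) = false := by
  simp only [List.any_eq_false, List.contains_eq_mem, decide_eq_true_eq] at h
  simp only [List.any_eq_false]
  intro x hx
  rw [Bool.not_eq_true, PySem.Chars.isIn_eq_false_iff]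
  fin_cases hx <;> intro hinf
  all_goals
    have hm := hinf.sublist.subset List.mem_cons_self
    exact h _ hm (by decide)

-- characterisation of B's fused loop
theorem pv_scanB_eq (t : List Char) (n st : Nat) :
    pvScanB t n st =
      if t.any (fun c => pvForbiddenB.contains c) then false
      else decide (n + t.length ≠ 0) && decide (t.foldl pvShlexStep st = 0)
             && decide (n + t.length ≤ 2048) := by
  induction t generalizing n st with
  | nil => rfl
  | cons c rest ih =>
      rcases h : pvForbiddenB.contains c with _ | _
      · have hany : ((c :: rest).any fun c => pvForbiddenB.contains c)
            = (rest.any fun c => pvForbiddenB.contains c) := by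
          rw [List.any_cons, h, Bool.false_or]
        rw [show pvScanB (c :: rest) n st
              = (if pvForbiddenB.contains c then false
                 else pvScanB rest (n + 1) (pvShlexStep st c)) from rfl,
            h, if_neg (by simp), ih, hany, List.foldl_cons, List.length_cons,
            show n + (rest.length + 1) = n + 1 + rest.length from by omega]
      · have hany : ((c :: rest).any fun c => pvForbiddenB.contains c) = true := by
          rw [List.any_cons, h, Bool.true_or]
        rw [show pvScanB (c :: rest) n st
              = (if pvForbiddenB.contains c then false
                 else pvScanB rest (n + 1) (pvShlexStep st c)) from rfl,
            h, if_pos (by simp), hany, if_pos (by simp)]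

-- the whole comparison, on the stripped character list
theorem pv_main (t : List Char) :
    (if t.isEmpty
        || pvForbidden.any (fun c => PySem.Chars.isIn [c] t)
        || pvForbiddenSub.any (fun x => PySem.Chars.isIn x t) then false
      else if pvShlexRaises t then false
      else decide (t.length ≤ 2048))
    = pvScanB t 0 0 := by
  rw [pv_scanB_eq, pv_any_swap]
  rcases hf : (t.any fun x => pvForbiddenB.contains x) with _ | _
  · rw [pv_sub_redundant t hf, Bool.or_false, Bool.or_false]
    by_cases he : t.isEmpty = true
    · rw [List.isEmpty_iff.mp he]
      simp
    · have hl : t.length ≠ 0 := by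
        simpa [List.isEmpty_iff, List.length_eq_zero_iff] using he
      rw [if_neg (by simpa using he)]
      by_cases hr : t.foldl pvShlexStep 0 = 0
      · simp [pvShlexRaises, hr, hl]
      · simp [pvShlexRaises, hr]
  · simp

-- ===== VERDICT (by name: the statement is the Claim_ definition above) =====
theorem process_cmd_catalog_ok_py_spec : Claim_equal_process_cmd_catalog_ok_py := by
  intro s _
  unfold Spec_process_cmd_catalog_ok_py process_cmd_catalog_ok_py process_cmd_catalog_ok_py_alt
  exact pv_main (PySem.Chars.strip s.toList)
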